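-- pv_equiv track=rewrite | github.com/PeterGy/LDMX-scripts | map.py | realChannel_to_SipM
-- ===== SOURCE A (Python) =====
-- def realChannel_to_SipM(c):#[layer,bar,side]
--     if c == None: return None
--     for i in range(1,10):
--         if 0 <= c and c <= 3: return [i,c,0]
--         if 4 <= c and c <= 7: return [i,c-4,1]
--         if 8 <= c and c <= 11: return [i,c-4,0]
--         if 12 <= c and c <= 15: return [i,c-8,1]
--         c-=16
--     for i in range(10,20):
--         if 0 <= c and c <= 3: return [i,c,0]
--         if 4 <= c and c <= 7: return [i,c-4,1]
--         if 8 <= c and c <= 11: return [i,c-4,0]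
--         if 12 <= c and c <= 15: return [i,c-8,1]
--         if 16 <= c and c <= 19: return [i,c-8,0]
--         if 20 <= c and c <= 23: return [i,c-12,1]
--         c-=24
--     return 'too many layers'
-- ===== SOURCE B (Python) =====
-- def realChannel_to_SipM(c):  # [layer,bar,side]
--     if c == None: return None
--     if 0 <= c and c < 144:
--         layer = int(c) // 16 + 1
--         r = c - 16 * (int(c) // 16)
--         extra = False
--     elif 144 <= c and c < 384:
--         c2 = c - 144
--         layer = 10 + int(c2) // 24
--         r = c2 - 24 * (int(c2) // 24)
--         extra = True
--     else:
--         return 'too many layers'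
--     if r <= 3: return [layer, r, 0]
--     if r <= 7: return [layer, r - 4, 1]
--     if r <= 11: return [layer, r - 4, 0]
--     if r <= 15: return [layer, r - 8, 1]
--     if extra and r <= 19: return [layer, r - 8, 0]
--     if extra: return [layer, r - 12, 1]
--     return 'too many layers'
-- ===== Notes on version B (the rewrite author's own statement) =====
-- stated objective: simpler
-- what changed: Replaced A's two subtract-and-retry loops (16 per layer, then 24 per layer) with direct floor-division to compute the layer and residual, then one range-bucket classification.
-- outside the precondition, e.g. on realChannel_to_SipM(384): A returns 'too many layers', B returns 'too many layers'; on realChannel_to_SipM(-1): A returns 'too many layers', B returns 'too many layers'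
import Mathlib
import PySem

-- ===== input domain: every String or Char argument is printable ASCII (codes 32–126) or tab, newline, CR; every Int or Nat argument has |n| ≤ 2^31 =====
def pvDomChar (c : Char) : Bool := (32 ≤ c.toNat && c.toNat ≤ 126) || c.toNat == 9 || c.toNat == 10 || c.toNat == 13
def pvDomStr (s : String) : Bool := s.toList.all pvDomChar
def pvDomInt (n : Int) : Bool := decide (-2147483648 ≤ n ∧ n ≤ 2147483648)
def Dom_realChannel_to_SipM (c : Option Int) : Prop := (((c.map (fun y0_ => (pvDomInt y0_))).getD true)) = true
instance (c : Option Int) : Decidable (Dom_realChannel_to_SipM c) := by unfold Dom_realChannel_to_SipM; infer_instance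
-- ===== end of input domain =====

-- B replaces A's two subtract-16/subtract-24 loops by direct floor-division arithmetic (objective: simpler).
-- Pre_ excludes channels on which A returns the string 'too many layers' (not a list of ints).

-- ===== PORT A =====
-- first loop: for i in range(1,10), carrying the mutated c; Sum.inr = fell through with leftover c
def pvLoop1 : List Int → Int → (Option (List Int)) ⊕ Int
  | [], c => Sum.inr c
  | i :: rest, c =>
    if 0 ≤ c ∧ c ≤ 3 then Sum.inl (some [i, c, 0])
    else if 4 ≤ c ∧ c ≤ 7 then Sum.inl (some [i, c - 4, 1])
    else if 8 ≤ c ∧ c ≤ 11 then Sum.inl (some [i, c - 4, 0])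
    else if 12 ≤ c ∧ c ≤ 15 then Sum.inl (some [i, c - 8, 1])
    else pvLoop1 rest (c - 16)

-- second loop: for i in range(10,20)
def pvLoop2 : List Int → Int → (Option (List Int)) ⊕ Int
  | [], c => Sum.inr c
  | i :: rest, c =>
    if 0 ≤ c ∧ c ≤ 3 then Sum.inl (some [i, c, 0])
    else if 4 ≤ c ∧ c ≤ 7 then Sum.inl (some [i, c - 4, 1])
    else if 8 ≤ c ∧ c ≤ 11 then Sum.inl (some [i, c - 4, 0])
    else if 12 ≤ c ∧ c ≤ 15 then Sum.inl (some [i, c - 8, 1])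
    else if 16 ≤ c ∧ c ≤ 19 then Sum.inl (some [i, c - 8, 0])
    else if 20 ≤ c ∧ c ≤ 23 then Sum.inl (some [i, c - 12, 1])
    else pvLoop2 rest (c - 24)

def realChannel_to_SipM (c : Option Int) : Option (List Int) :=
  match c with
  | none => none
  | some c0 =>
    match pvLoop1 (PySem.List.pyRange 1 10 1) c0 with
    | Sum.inl r => r
    | Sum.inr c1 =>
      match pvLoop2 (PySem.List.pyRange 10 20 1) c1 with
      | Sum.inl r => r
      | Sum.inr _ => none  -- Python returns the string 'too many layers' here; excluded by Pre_

-- ===== PORT B =====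
def pvBucket (extra : Bool) (layer r : Int) : Option (List Int) :=
  if r ≤ 3 then some [layer, r, 0]
  else if r ≤ 7 then some [layer, r - 4, 1]
  else if r ≤ 11 then some [layer, r - 4, 0]
  else if r ≤ 15 then some [layer, r - 8, 1]
  else if extra = true ∧ r ≤ 19 then some [layer, r - 8, 0]
  else if extra = true then some [layer, r - 12, 1]
  else none  -- Source B's final 'too many layers' (unreachable for integer channels); excluded by Pre_

def realChannel_to_SipM_alt (c : Option Int) : Option (List Int) :=
  match c with
  | none => none
  | some v =>
    if 0 ≤ v ∧ v < 144 then
      pvBucket false (PySem.Int.floordiv v 16 + 1) (v - 16 * PySem.Int.floordiv v 16)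
    else if 144 ≤ v ∧ v < 384 then
      pvBucket true (10 + PySem.Int.floordiv (v - 144) 24)
        ((v - 144) - 24 * PySem.Int.floordiv (v - 144) 24)
    else none  -- Python B returns 'too many layers' here; excluded by Pre_

-- ===== PRECONDITION & SPEC =====
-- Pre_ excludes integer channels outside [0, 384), on which A (and B) return the string
-- 'too many layers' — not a value of the declared Option (List Int) type.
def Pre_realChannel_to_SipM (c : Option Int) : Prop :=
  ((c.map (fun v => decide (0 ≤ v ∧ v < 384))).getD true) = true
instance (c : Option Int) : Decidable (Pre_realChannel_to_SipM c) := by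
  unfold Pre_realChannel_to_SipM; infer_instance

def pvWitness_realChannel_to_SipM : Option Int := some 17

def Spec_realChannel_to_SipM (c : Option Int) (out : Option (List Int)) : Prop := out = realChannel_to_SipM_alt c
instance (c : Option Int) (out : Option (List Int)) : Decidable (Spec_realChannel_to_SipM c out) := by unfold Spec_realChannel_to_SipM; infer_instance

-- ===== CLAIM (what is proved, stated in full; the proofs are below) =====
def Claim_equal_realChannel_to_SipM : Prop := ∀ (c : Option Int), Dom_realChannel_to_SipM c → Pre_realChannel_to_SipM c → Spec_realChannel_to_SipM c (realChannel_to_SipM c)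

-- ===== LEMMAS AND PROOFS =====
-- the two ports agree on every integer channel 0 ≤ n < 384 (finite check)
set_option maxRecDepth 4096 in
theorem pvAgree : ∀ n : Nat, n < 384 →
    realChannel_to_SipM (some (n : Int)) = realChannel_to_SipM_alt (some (n : Int)) := by
  decide

-- ===== VERDICT (by name: the statement is the Claim_ definition above) =====
theorem realChannel_to_SipM_spec : Claim_equal_realChannel_to_SipM := by
  intro c _ hpre
  unfold Spec_realChannel_to_SipM
  cases c with
  | none => rfl
  | some v =>
    simp only [Pre_realChannel_to_SipM, Option.map_some, Option.getD_some,
      decide_eq_true_eq] at hpre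
    have hv : v = ((v.toNat : Nat) : Int) := (Int.toNat_of_nonneg hpre.1).symm
    have hn : v.toNat < 384 := by omega
    rw [hv]
    exact pvAgree v.toNat hn
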